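-- pv_equiv track=rewrite | github.com/i1red/computer-graphics-6th-sem | Lab02/utils.py | gen_colors
-- ===== SOURCE A (Python) =====
-- import math
-- import itertools
--
-- _DEFAULT_MAX_GRADATION = 192
--
-- def rgb_to_hex(rgb: tuple[int, int, int]) -> str:
--     r, g, b = rgb
--     return f'#{r:02x}{g:02x}{b:02x}'
--
-- def gen_colors(color_num: int, max_gradation: int = _DEFAULT_MAX_GRADATION) -> list[str]:
--     colors_per_iteration = 2 ** 3 - 1  # excluding black color
--     iterations_num = math.ceil(color_num / colors_per_iteration)
--     colors = []
--
--     for i in range(iterations_num):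
--         gradation = max_gradation - i * (max_gradation // iterations_num)
--         colors.extend(list(itertools.product((0, gradation), repeat=3))[1:])
--
--     return [rgb_to_hex(rgb) for rgb in colors[:color_num]]
-- ===== SOURCE B (Python) =====
-- import math
--
--
-- def gen_colors(color_num: int, max_gradation: int = 192) -> list[str]:
--     if color_num <= 0:
--         return []
--     iterations_num = math.ceil(color_num / 7)
--     step = max_gradation // iterations_num
--     result = []
--     for k in range(color_num):
--         g = max_gradation - (k // 7) * step
--         j = k % 7 + 1
--         result.append('#%02x%02x%02x' % (g * (j // 4 % 2), g * (j // 2 % 2), g * (j % 2)))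
--     return result
-- ===== Notes on version B (the rewrite author's own statement) =====
-- stated objective: simpler
-- what changed: Replaces the per-block loop building itertools.product tuples plus a final truncating slice by a single direct pass over k in range(color_num), computing each channel from the bits of k%7+1.
import Mathlib
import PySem

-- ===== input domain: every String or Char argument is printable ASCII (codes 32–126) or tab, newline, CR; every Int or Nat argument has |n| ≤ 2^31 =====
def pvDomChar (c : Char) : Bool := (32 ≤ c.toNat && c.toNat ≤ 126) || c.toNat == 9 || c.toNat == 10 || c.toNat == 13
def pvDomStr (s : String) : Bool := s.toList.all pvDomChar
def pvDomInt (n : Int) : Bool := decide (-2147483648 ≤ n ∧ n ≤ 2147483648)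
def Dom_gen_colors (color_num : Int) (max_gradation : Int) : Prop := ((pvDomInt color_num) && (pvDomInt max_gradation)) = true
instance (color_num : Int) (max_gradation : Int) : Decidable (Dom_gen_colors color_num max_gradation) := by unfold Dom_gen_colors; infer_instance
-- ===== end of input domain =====

-- B replaces A's per-block loop over itertools.product tuples (plus a final truncating
-- slice) by one direct pass over k in range(color_num); objective: simpler.

-- ===== PORT A =====
-- f'{n:02x}': lowercase hex, zero-padded to width 2; a negative value renders as '-' ++ hex(|n|)
-- (width 2 then needs no padding). Exact for every Int (hand-ported; PySem has no hex format).
def pyHex02 (n : Int) : String :=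
  if n < 0 then "-" ++ String.ofList (Nat.toDigits 16 (-n).toNat)
  else if n < 16 then "0" ++ String.ofList (Nat.toDigits 16 n.toNat)
  else String.ofList (Nat.toDigits 16 n.toNat)

def rgb_to_hex (r g b : Int) : String := "#" ++ pyHex02 r ++ pyHex02 g ++ pyHex02 b

-- math.ceil(color_num / 7): exact as -((-color_num) // 7) since |color_num| ≤ 2^31 keeps the
-- float division's ceiling exact.
-- list(itertools.product((0, g), repeat=3))[1:] is the literal 7-tuple list below.
def gen_colors (color_num : Int) (max_gradation : Int) : List String :=
  let iterations_num : Int := -(PySem.Int.floordiv (-color_num) 7)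
  let colors : List (Int × Int × Int) :=
    (PySem.List.pyRange 0 iterations_num 1).foldl (fun acc i =>
      let g := max_gradation - i * (PySem.Int.floordiv max_gradation iterations_num)
      acc ++ [(0,0,g),(0,g,0),(0,g,g),(g,0,0),(g,0,g),(g,g,0),(g,g,g)]) []
  (PySem.List.slice colors none (some color_num)).map (fun t => rgb_to_hex t.1 t.2.1 t.2.2)

-- ===== PORT B =====
def gen_colors_alt (color_num : Int) (max_gradation : Int) : List String :=
  if color_num ≤ 0 then []
  else
    let iterations_num : Int := -(PySem.Int.floordiv (-color_num) 7)
    let step := PySem.Int.floordiv max_gradation iterations_num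
    (PySem.List.pyRange 0 color_num 1).foldl (fun acc k =>
      let g := max_gradation - (PySem.Int.floordiv k 7) * step
      let j := PySem.Int.mod k 7 + 1
      acc ++ [rgb_to_hex (g * PySem.Int.mod (PySem.Int.floordiv j 4) 2)
                         (g * PySem.Int.mod (PySem.Int.floordiv j 2) 2)
                         (g * PySem.Int.mod j 2)]) []

-- ===== PRECONDITION & SPEC =====
def Spec_gen_colors (color_num : Int) (max_gradation : Int) (out : List String) : Prop := out = gen_colors_alt color_num max_gradation
instance (color_num : Int) (max_gradation : Int) (out : List String) : Decidable (Spec_gen_colors color_num max_gradation out) := by unfold Spec_gen_colors; infer_instance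

-- ===== CLAIM (what is proved, stated in full; the proofs are below) =====
def Claim_equal_gen_colors : Prop := ∀ (color_num : Int) (max_gradation : Int), Dom_gen_colors color_num max_gradation → Spec_gen_colors color_num max_gradation (gen_colors color_num max_gradation)

-- ===== LEMMAS AND PROOFS =====

-- the tuple B computes for slot r (0 ≤ r < 7) of a block with gradation g
def pvEntry (g : Int) (r : Nat) : Int × Int × Int :=
  (g * ((r + 1) / 4 % 2 : Nat), g * ((r + 1) / 2 % 2 : Nat), g * ((r + 1) % 2 : Nat))

-- A's block-by-block tuple list, flattened, is B's k ↦ pvEntry (k/7) (k%7) table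
lemma flatMap_blocks (N : Nat) (grad : Nat → Int) :
    (List.range N).flatMap (fun i =>
        let g := grad i
        ([(0,0,g),(0,g,0),(0,g,g),(g,0,0),(g,0,g),(g,g,0),(g,g,g)] : List (Int × Int × Int)))
      = (List.range (7 * N)).map (fun k => pvEntry (grad (k / 7)) (k % 7)) := by
  induction N with
  | zero => simp
  | succ n ih =>
    rw [List.range_succ, List.flatMap_append, ih, Nat.mul_succ, List.range_add, List.map_append,
      List.map_map]
    congr 1
    have h7 : (List.range 7) = [0,1,2,3,4,5,6] := by decide
    simp only [h7, List.map_cons, List.map_nil, Function.comp, List.flatMap_cons,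
      List.flatMap_nil, List.append_nil]
    norm_num [pvEntry, Nat.mul_add_div, Nat.mul_add_mod]

theorem gen_colors_spec_aux : ∀ (c m : Int), gen_colors c m = gen_colors_alt c m := by
  intro c m
  by_cases hc : c ≤ 0
  · -- iterations_num ≤ 0, so A's loop body never runs and both sides are []
    have hI : (-(PySem.Int.floordiv (-c) 7)).toNat = 0 := by
      have := PySem.Int.floordiv_eq_ediv_of_pos (a := -c) (b := 7) (by omega)
      omega
    have hr : PySem.List.pyRange 0 (-(PySem.Int.floordiv (-c) 7)) 1 = [] := by
      rw [PySem.List.pyRange_one]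
      have h0 : (-(PySem.Int.floordiv (-c) 7) - 0).toNat = 0 := by omega
      rw [h0]
      rfl
    show (PySem.List.slice _ none (some c)).map _ = (if c ≤ 0 then _ else _)
    rw [if_pos hc, hr]
    simp [PySem.List.slice]
  · rw [not_le] at hc
    obtain ⟨n, rfl⟩ : ∃ n : Nat, c = (n : Int) := ⟨c.toNat, by omega⟩
    have hn : 0 < n := by exact_mod_cast hc
    -- the ceiling: iterations_num = (n+6)/7 as a Nat
    have hI : -(PySem.Int.floordiv (-(n : Int)) 7) = (((n + 6) / 7 : Nat) : Int) := by
      rw [PySem.Int.neg_floordiv_neg_eq_iff_of_pos (by omega)]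
      constructor <;> [push_cast; push_cast] <;> omega
    have hle : n ≤ 7 * ((n + 6) / 7) := by omega
    set step := PySem.Int.floordiv m (((n + 6) / 7 : Nat) : Int) with hstep
    have hA : gen_colors (n : Int) m
        = (List.range n).map (fun k =>
            (fun t : Int × Int × Int => rgb_to_hex t.1 t.2.1 t.2.2)
              (pvEntry (m - ((k / 7 : Nat) : Int) * step) (k % 7))) := by
      show (PySem.List.slice _ none (some (n : Int))).map _ = _
      rw [hI]
      rw [PySem.List.foldl_append_eq_flatMap]
      rw [PySem.List.pyRange_one]
      simp only [zero_add, sub_zero, Int.toNat_natCast, List.flatMap_map, List.nil_append]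
      rw [flatMap_blocks ((n + 6) / 7) (fun i => m - (i : Int) * step)]
      rw [PySem.List.slice_to_natCast, ← List.map_take, List.take_range,
        Nat.min_eq_left hle, List.map_map]
      rfl
    have hB : gen_colors_alt (n : Int) m
        = (List.range n).map (fun k =>
            rgb_to_hex ((m - ((k / 7 : Nat) : Int) * step) * ((k % 7 + 1) / 4 % 2 : Nat))
                       ((m - ((k / 7 : Nat) : Int) * step) * ((k % 7 + 1) / 2 % 2 : Nat))
                       ((m - ((k / 7 : Nat) : Int) * step) * ((k % 7 + 1) % 2 : Nat))) := by
      show (if (n : Int) ≤ 0 then _ else _) = _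
      rw [if_neg (by omega)]
      simp only [hI, ← hstep]
      rw [PySem.List.foldl_append_singleton_eq_map, PySem.List.pyRange_one]
      simp only [zero_add, sub_zero, Int.toNat_natCast, List.map_map, List.nil_append]
      refine List.map_congr_left (fun k _ => ?_)
      have h1 : PySem.Int.floordiv ((k : Int)) 7 = ((k / 7 : Nat) : Int) :=
        PySem.Int.floordiv_natCast k 7
      have h2a : PySem.Int.mod ((k : Int)) 7 = ((k % 7 : Nat) : Int) := PySem.Int.mod_natCast k 7
      have h2 : PySem.Int.mod ((k : Int)) 7 + 1 = ((k % 7 + 1 : Nat) : Int) := by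
        rw [h2a]; push_cast; ring
      have e4 : ∀ a : Nat, PySem.Int.floordiv ((a : Nat) : Int) 4 = ((a / 4 : Nat) : Int) :=
        fun a => PySem.Int.floordiv_natCast a 4
      have e2 : ∀ a : Nat, PySem.Int.floordiv ((a : Nat) : Int) 2 = ((a / 2 : Nat) : Int) :=
        fun a => PySem.Int.floordiv_natCast a 2
      have e3 : ∀ a : Nat, PySem.Int.mod ((a : Nat) : Int) 2 = ((a % 2 : Nat) : Int) :=
        fun a => PySem.Int.mod_natCast a 2
      simp only [Function.comp, h1, h2, e4, e2, e3]
    rw [hA, hB]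
    exact List.map_congr_left (fun k _ => by simp [pvEntry])

-- ===== VERDICT (by name: the statement is the Claim_ definition above) =====
theorem gen_colors_spec : Claim_equal_gen_colors := by
  intro c m _
  exact gen_colors_spec_aux c m
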